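-- pv_equiv track=rewrite | github.com/Fedrosauro/Mathematical-optimization-project | utilities.py | truck_tour_time
-- ===== SOURCE A (Python) =====
-- def truck_tour_time(truck_travel_times, tour):
--     if (len(tour) == 0):
--         return 0
--     total_time = truck_travel_times[0][tour[0]]
--     for i in range(len(tour) - 1):
--         total_time += truck_travel_times[tour[i]][tour[i + 1]]
--     total_time += truck_travel_times[tour[-1]][0]
--     return total_time
-- ===== SOURCE B (Python) =====
-- def truck_tour_time(truck_travel_times, tour):
--     if not tour:
--         return 0
--
--     def go(prev, rest):
--         if not rest:
--             return truck_travel_times[prev][0]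
--         nxt = rest[0]
--         return truck_travel_times[prev][nxt] + go(nxt, rest[1:])
--
--     return go(0, list(tour))
-- ===== Notes on version B (the rewrite author's own statement) =====
-- stated objective: alternative
-- what changed: B replaces A's indexed loop with three separate additions by a structural recursion over the tour that carries the previous stop and adds the closing edge to depot at the recursion's base case; no index arithmetic or negative indexing is used.
import Mathlib
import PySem

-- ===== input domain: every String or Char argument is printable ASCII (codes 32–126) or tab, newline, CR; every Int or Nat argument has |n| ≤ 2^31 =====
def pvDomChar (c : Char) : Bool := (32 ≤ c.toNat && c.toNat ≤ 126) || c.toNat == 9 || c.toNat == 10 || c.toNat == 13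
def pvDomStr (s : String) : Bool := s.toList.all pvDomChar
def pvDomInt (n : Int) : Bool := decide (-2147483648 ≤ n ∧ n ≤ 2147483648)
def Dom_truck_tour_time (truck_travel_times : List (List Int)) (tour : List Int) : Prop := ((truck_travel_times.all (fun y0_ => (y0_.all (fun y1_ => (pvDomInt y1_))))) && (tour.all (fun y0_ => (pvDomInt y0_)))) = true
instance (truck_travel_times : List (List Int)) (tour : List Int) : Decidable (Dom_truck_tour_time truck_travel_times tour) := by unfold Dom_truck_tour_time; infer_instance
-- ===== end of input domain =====

-- B replaces A's indexed loop and three separate additions by a structural recursion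
-- carrying the previous stop, closing back to the depot at the base case (alternative decomposition, same cost).

-- ===== PORT A =====
def truck_tour_time (truck_travel_times : List (List Int)) (tour : List Int) : Int :=
  if tour.length = 0 then 0
  else
    let total_time :=
      PySem.List.pyGetD (PySem.List.pyGetD truck_travel_times 0 []) (PySem.List.pyGetD tour 0 0) 0
    let total_time :=
      (PySem.List.pyRange 0 ((tour.length : Int) - 1) 1).foldl
        (fun acc i =>
          acc + PySem.List.pyGetD (PySem.List.pyGetD truck_travel_times (PySem.List.pyGetD tour i 0) [])
                  (PySem.List.pyGetD tour (i + 1) 0) 0)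
        total_time
    total_time + PySem.List.pyGetD (PySem.List.pyGetD truck_travel_times (PySem.List.pyGetD tour (-1) 0) []) 0 0

-- ===== PORT B =====
-- recursion: 'go(prev, rest)' of Source B, step for step
def pvGo (truck_travel_times : List (List Int)) (prev : Int) : List Int → Int
  | [] => PySem.List.pyGetD (PySem.List.pyGetD truck_travel_times prev []) 0 0
  | nxt :: rest =>
      PySem.List.pyGetD (PySem.List.pyGetD truck_travel_times prev []) nxt 0 +
        pvGo truck_travel_times nxt rest

def truck_tour_time_alt (truck_travel_times : List (List Int)) (tour : List Int) : Int :=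
  if tour = [] then 0 else pvGo truck_travel_times 0 tour

-- ===== PRECONDITION & SPEC =====
-- Pre_ excludes exactly the inputs on which A raises IndexError: every traversed edge (a, b) of the
-- cycle 0 → tour → 0 must have a a valid (possibly negative, Python-wrapping) row index and b a valid
-- column index in that row; an empty tour is always accepted (A touches nothing).
def Pre_truck_tour_time (truck_travel_times : List (List Int)) (tour : List Int) : Prop :=
  tour = [] ∨
    ∀ p ∈ ((0 :: tour).zip (tour ++ [(0 : Int)])),
      PySem.Raise.InRange truck_travel_times.length p.1 ∧
      PySem.Raise.InRange (PySem.List.pyGetD truck_travel_times p.1 []).length p.2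
instance (truck_travel_times : List (List Int)) (tour : List Int) : Decidable (Pre_truck_tour_time truck_travel_times tour) := by unfold Pre_truck_tour_time; infer_instance

def pvWitness_truck_tour_time : List (List Int) × List Int := ([[1, 2], [3, 4]], [1])

def Spec_truck_tour_time (truck_travel_times : List (List Int)) (tour : List Int) (out : Int) : Prop := out = truck_tour_time_alt truck_travel_times tour
instance (truck_travel_times : List (List Int)) (tour : List Int) (out : Int) : Decidable (Spec_truck_tour_time truck_travel_times tour out) := by unfold Spec_truck_tour_time; infer_instance

-- ===== CLAIM (what is proved, stated in full; the proofs are below) =====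
def Claim_equal_truck_tour_time : Prop := ∀ (truck_travel_times : List (List Int)) (tour : List Int), Dom_truck_tour_time truck_travel_times tour → Pre_truck_tour_time truck_travel_times tour → Spec_truck_tour_time truck_travel_times tour (truck_tour_time truck_travel_times tour)

-- ===== LEMMAS AND PROOFS =====

-- A's middle loop over range(len(tour)-1), started at index k, equals a fold over adjacent pairs
-- of the suffix of `full` from k.
theorem pv_loop_eq (tt : List (List Int)) (full : List Int) :
    ∀ (n k : Nat) (acc : Int), full.length ≤ k + n →
      (PySem.List.pyRange (k : Int) ((full.length : Int) - 1) 1).foldl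
        (fun acc i =>
          acc + PySem.List.pyGetD (PySem.List.pyGetD tt (PySem.List.pyGetD full i 0) [])
                  (PySem.List.pyGetD full (i + 1) 0) 0) acc
      = ((full.drop k).zip (full.drop (k + 1))).foldl
          (fun acc p => acc + PySem.List.pyGetD (PySem.List.pyGetD tt p.1 []) p.2 0) acc := by
  intro n
  induction n with
  | zero =>
    intro k acc h
    have h1 : ((full.length : Int) - 1) ≤ (k : Int) := by omega
    rw [PySem.List.pyRange_one_eq_nil h1]
    have h2 : full.drop (k + 1) = [] := List.drop_eq_nil_of_le (by omega)
    simp [h2]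
  | succ m ih =>
    intro k acc h
    by_cases hk : k + 1 < full.length
    · have hlt : (k : Int) < (full.length : Int) - 1 := by omega
      have hd1 : full.drop k = full[k] :: full.drop (k + 1) :=
        List.drop_eq_getElem_cons (by omega)
      have hd2 : full.drop (k + 1) = full[k + 1] :: full.drop (k + 1 + 1) :=
        List.drop_eq_getElem_cons (by omega)
      have hg1 : PySem.List.pyGetD full (k : Int) 0 = full[k] :=
        PySem.List.pyGetD_ofNat full k 0 (by omega)
      have hg2 : PySem.List.pyGetD full ((k + 1 : Nat) : Int) 0 = full[k + 1] :=
        PySem.List.pyGetD_ofNat full (k + 1) 0 (by omega)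
      have hcast : ((k : Int) + 1) = ((k + 1 : Nat) : Int) := by push_cast; ring
      rw [PySem.List.pyRange_one_cons hlt]
      simp only [List.foldl_cons]
      rw [hcast, hg1, hg2]
      rw [ih (k + 1) _ (by omega)]
      conv_lhs => rw [hd2]
      conv_rhs => rw [hd1, hd2]
      rw [List.zip_cons_cons, List.foldl_cons]
    · have h1 : ((full.length : Int) - 1) ≤ (k : Int) := by omega
      rw [PySem.List.pyRange_one_eq_nil h1]
      have h2 : full.drop (k + 1) = [] := List.drop_eq_nil_of_le (by omega)
      simp [h2]

-- B's recursion characterized: pvGo from `prev` over `l` is the sum of the edge costs along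
-- (prev :: l) plus the closing edge from the last stop back to 0.
theorem pv_go_char (tt : List (List Int)) :
    ∀ (l : List Int) (prev : Int),
      pvGo tt prev l
        = (((prev :: l).zip l).map
            (fun p => PySem.List.pyGetD (PySem.List.pyGetD tt p.1 []) p.2 0)).sum
          + PySem.List.pyGetD
              (PySem.List.pyGetD tt ((prev :: l).getLast (by simp)) []) 0 0 := by
  intro l
  induction l with
  | nil => intro prev; simp [pvGo]
  | cons x rest ih =>
    intro prev
    simp only [pvGo, List.zip_cons_cons, List.map_cons, List.sum_cons, ih x]
    have : (prev :: x :: rest).getLast (by simp) = (x :: rest).getLast (by simp) := by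
      simp [List.getLast]
    rw [this]; ring

theorem truck_tour_time_eq_alt (tt : List (List Int)) (tour : List Int) :
    truck_tour_time tt tour = truck_tour_time_alt tt tour := by
  cases tour with
  | nil => simp [truck_tour_time, truck_tour_time_alt]
  | cons t0 ts =>
    have hne : (t0 :: ts) ≠ [] := by simp
    unfold truck_tour_time truck_tour_time_alt
    simp only [List.length_cons, if_neg (by omega : ¬ ts.length + 1 = 0), if_neg hne]
    have hloop := pv_loop_eq tt (t0 :: ts) (t0 :: ts).length 0
      (PySem.List.pyGetD (PySem.List.pyGetD tt 0 []) (PySem.List.pyGetD (t0 :: ts) 0 0) 0)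
      (by omega)
    simp only [Nat.cast_zero, List.length_cons, List.drop_succ_cons, List.drop_zero,
      Nat.zero_add] at hloop
    rw [hloop]
    rw [PySem.List.foldl_add]
    have hneg : PySem.List.pyGetD (t0 :: ts) (-1) 0 = (t0 :: ts).getLast hne :=
      PySem.List.pyGetD_neg_one (t0 :: ts) 0 hne
    rw [pv_go_char tt (t0 :: ts) 0]
    have hlast : ((0 : Int) :: t0 :: ts).getLast (by simp) = (t0 :: ts).getLast hne := by
      simp [List.getLast]
    rw [hlast, hneg]
    simp only [List.zip_cons_cons, List.map_cons, List.sum_cons, PySem.List.pyGetD_zero_cons]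

-- ===== VERDICT (by name: the statement is the Claim_ definition above) =====
theorem truck_tour_time_spec : Claim_equal_truck_tour_time := by
  intro tt tour _ _
  unfold Spec_truck_tour_time
  exact truck_tour_time_eq_alt tt tour
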